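-- pv_equiv track=rewrite | github.com/seolyucode/problemSolving | inHome/Study/쿠/3.py | solution
-- ===== SOURCE A (Python) =====
-- def solution(k, score):
--     # lst = []
--     # for i in range(len(score) - 1):
--     #     lst.append(score[i] - score[i + 1])
--     # check = []
--     # for i in lst:
--     #     if (lst.count(i) >= k):
--     #         continue
--     #     else:
--     #         check.append(i)
--
--     # 예외처리해야함
--     # 시간복잡도 줄이기
--     # return len(check)-1
--
--     scoreDiffList = []
--     scoreDiffDic = {}
--     checkList = []
--     for i in range(len(score) - 1):
--         diff_score = score[i] - score[i + 1]
--         scoreDiffList.append(diff_score)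
--         if scoreDiffDic.get(diff_score):
--             scoreDiffDic[diff_score] += 1
--         else:
--             scoreDiffDic[diff_score] = 1
--     for scoreDiff in scoreDiffList:
--         if scoreDiffDic[scoreDiff] < k:
--             checkList.append(scoreDiff)
--     if len(checkList) > 0:
--         return len(checkList) - 1
--     return len(checkList)
-- ===== SOURCE B (Python) =====
-- def solution(k, score):
--     # Sort the consecutive differences, then scan equal runs: a run of length
--     # r (< k) contributes r; finally apply A's "minus one if positive" rule.
--     diffs = sorted(a - b for a, b in zip(score, score[1:]))
--     n = len(diffs)
--     total = 0
--     i = 0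
--     while i < n:
--         j = i + 1
--         while j < n and diffs[j] == diffs[i]:
--             j += 1
--         if j - i < k:
--             total += j - i
--         i = j
--     return total - 1 if total > 0 else total
-- ===== Notes on version B (the rewrite author's own statement) =====
-- stated objective: alternative
-- what changed: B replaces A's dict-of-frequencies plus a second re-scan of the materialised diff list by a sort-then-run-scan: it sorts the consecutive differences and walks equal runs once, adding each run length below k, with no dictionary and no second pass over the diffs.
import Mathlib
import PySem

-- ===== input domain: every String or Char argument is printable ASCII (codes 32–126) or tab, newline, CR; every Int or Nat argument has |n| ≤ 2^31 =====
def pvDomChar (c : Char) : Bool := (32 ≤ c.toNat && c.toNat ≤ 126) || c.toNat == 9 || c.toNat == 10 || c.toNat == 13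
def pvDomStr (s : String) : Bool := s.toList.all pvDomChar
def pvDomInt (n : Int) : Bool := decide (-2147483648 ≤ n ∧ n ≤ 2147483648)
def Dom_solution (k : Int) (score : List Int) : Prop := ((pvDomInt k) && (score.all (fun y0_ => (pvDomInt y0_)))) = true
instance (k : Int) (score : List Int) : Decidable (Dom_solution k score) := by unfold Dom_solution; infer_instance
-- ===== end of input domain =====

-- B sorts the consecutive differences and scans equal runs once, summing run lengths
-- below k, instead of A's frequency dict plus second re-scan of the diff list
-- (objective: alternative algorithm, sort-based instead of hash-based).

-- ===== PORT A =====
def solution (k : Int) (score : List Int) : Int :=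
  let st := (PySem.List.pyRange 0 ((score.length : Int) - 1)).foldl
    (fun (st : List Int × PySem.Dict Int Int) i =>
      let diff := PySem.List.pyGetD score i 0 - PySem.List.pyGetD score (i + 1) 0
      (st.1 ++ [diff],
       if (st.2.get? diff).getD 0 ≠ 0 then st.2.modify diff 0 (· + 1)
       else st.2.insert diff 1))
    (([] : List Int), (PySem.Dict.empty : PySem.Dict Int Int))
  let checkList := st.1.foldl
    (fun acc x => if (st.2.get? x).getD 0 < k then acc ++ [x] else acc) ([] : List Int)
  if (checkList.length : Int) > 0 then (checkList.length : Int) - 1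
  else (checkList.length : Int)

-- ===== PORT B =====
-- the outer while-loop of Source B: the inner while finds the run of the head value
-- (takeWhile/dropWhile render the index scan j over the run), total accumulates
def runScanB (k : Int) (total : Int) : List Int → Int
  | [] => total
  | v :: t =>
    let run : Int := 1 + ((t.takeWhile (fun x => x == v)).length : Int)
    runScanB k (if run < k then total + run else total) (t.dropWhile (fun x => x == v))
termination_by m => m.length
decreasing_by
  simp only [List.length_cons]
  exact Nat.lt_succ_of_le (List.length_dropWhile_le _ _)

def solution_alt (k : Int) (score : List Int) : Int :=
  let diffs := PySem.List.sorted ((score.zip (score.drop 1)).map (fun p => p.1 - p.2))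
    (fun x => x) false
  let total := runScanB k 0 diffs
  if total > 0 then total - 1 else total

-- ===== PRECONDITION & SPEC =====
def Spec_solution (k : Int) (score : List Int) (out : Int) : Prop := out = solution_alt k score
instance (k : Int) (score : List Int) (out : Int) : Decidable (Spec_solution k score out) := by unfold Spec_solution; infer_instance

-- ===== CLAIM =====
def Claim_equal_solution : Prop := ∀ (k : Int) (score : List Int), Dom_solution k score → Spec_solution k score (solution k score)

-- ===== LEMMAS AND PROOFS =====

lemma diffs_eq (score : List Int) :
    (PySem.List.pyRange 0 ((score.length : Int) - 1)).map
      (fun i => PySem.List.pyGetD score i 0 - PySem.List.pyGetD score (i + 1) 0)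
    = (score.zip (score.drop 1)).map (fun p => p.1 - p.2) := by
  rcases score with _ | ⟨a, t⟩
  · rfl
  · have hlen : ((a :: t).length : Int) - 1 = (t.length : Nat) := by
      simp
    rw [hlen, PySem.List.pyRange_zero_natCast, List.map_map]
    apply List.ext_getElem
    · simp [List.length_zip]
    · intro j h1 h2
      simp only [List.getElem_map, List.getElem_range, Function.comp, List.getElem_zip]
      have hj : j < t.length := by simpa using h1
      rw [PySem.List.pyGetD_eq_getElem _ _ (by positivity) (by simp; omega),
          PySem.List.pyGetD_eq_getElem _ _ (by positivity) (by simp; omega)]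
      have h2' : ((j : Int) + 1).toNat = j + 1 := by omega
      simp [h2']

lemma stepA_eq (d : PySem.Dict Int Int) (x : Int) :
    (if (d.get? x).getD 0 ≠ 0 then d.modify x 0 (· + 1) else d.insert x 1)
      = d.insert x (d.getD x 0 + 1) := by
  by_cases h : (d.get? x).getD 0 ≠ 0
  · simp [h, PySem.Dict.modify, PySem.Dict.getD_eq_get?_getD]
  · rw [not_not] at h
    simp only [PySem.Dict.getD_eq_get?_getD, h]
    simp

lemma dictA_eq (score : List Int) :
    List.foldl (fun (d : PySem.Dict Int Int) (i : Int) =>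
        let diff := PySem.List.pyGetD score i 0 - PySem.List.pyGetD score (i + 1) 0
        if (d.get? diff).getD 0 ≠ 0 then d.modify diff 0 (· + 1) else d.insert diff 1)
      PySem.Dict.empty (PySem.List.pyRange 0 ((score.length : Int) - 1))
    = PySem.Dict.counter ((score.zip (score.drop 1)).map (fun p => p.1 - p.2)) := by
  have hfun : (fun (d : PySem.Dict Int Int) (i : Int) =>
        let diff := PySem.List.pyGetD score i 0 - PySem.List.pyGetD score (i + 1) 0
        if (d.get? diff).getD 0 ≠ 0 then d.modify diff 0 (· + 1) else d.insert diff 1)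
      = (fun (d : PySem.Dict Int Int) (i : Int) =>
          d.insert (PySem.List.pyGetD score i 0 - PySem.List.pyGetD score (i + 1) 0)
            (d.getD (PySem.List.pyGetD score i 0 - PySem.List.pyGetD score (i + 1) 0) 0 + 1)) := by
    funext d i
    exact stepA_eq d _
  rw [hfun]
  rw [← List.foldl_map (f := fun i => PySem.List.pyGetD score i 0 - PySem.List.pyGetD score (i + 1) 0)
        (g := fun (d : PySem.Dict Int Int) x => d.insert x (d.getD x 0 + 1)),
      diffs_eq, PySem.Dict.foldl_insert_getD_add_one_eq_counter]

-- In a sorted list headed by v, takeWhile (== v) collects ALL copies of v.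
lemma takeWhile_count (v : Int) (t : List Int) (hp : (v :: t).Pairwise (· ≤ ·)) :
    (t.takeWhile (fun x => x == v)).length = t.count v ∧
    (t.dropWhile (fun x => x == v)).count v = 0 := by
  have hdrop : (t.dropWhile (fun x => x == v)).count v = 0 := by
    rcases hd : t.dropWhile (fun x => x == v) with _ | ⟨w, r⟩
    · simp
    · have hw : ¬ (w == v) = true := by
        have := List.head?_dropWhile_not (p := fun x => x == v) (l := t)
        rw [hd] at this
        simpa using this
      have hwv : v < w := by
        have hmem : w ∈ t := by
          have : w ∈ t.dropWhile (fun x => x == v) := by rw [hd]; exact List.mem_cons_self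
          exact (List.dropWhile_sublist _).mem this
        have hle : v ≤ w := (List.pairwise_cons.mp hp).1 w hmem
        have : w ≠ v := by simpa using hw
        omega
      have hdp : (w :: r).Pairwise (· ≤ ·) := by
        rw [← hd]
        exact ((List.pairwise_cons.mp hp).2).sublist (List.dropWhile_sublist _)
      apply List.count_eq_zero.mpr
      intro hv
      rcases List.mem_cons.mp hv with h | h
      · omega
      · have := (List.pairwise_cons.mp hdp).1 v h
        omega
  constructor
  · have hsplit : t.count v = (t.takeWhile (fun x => x == v)).count v
        + (t.dropWhile (fun x => x == v)).count v := by
      conv_lhs => rw [← List.takeWhile_append_dropWhile (p := fun x => x == v) (l := t)]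
      rw [List.count_append]
    have htake : (t.takeWhile (fun x => x == v)).count v
        = (t.takeWhile (fun x => x == v)).length := by
      apply List.count_eq_length.mpr
      intro x hx
      have := List.mem_takeWhile_imp hx
      exact (by simpa using this : x = v).symm
    omega
  · exact hdrop

-- every element of takeWhile (== v) is v
lemma takeWhile_replicate (v : Int) (t : List Int) :
    t.takeWhile (fun x => x == v) = List.replicate (t.takeWhile (fun x => x == v)).length v := by
  apply List.eq_replicate_of_mem
  intro x hx
  have := List.mem_takeWhile_imp hx
  simpa using this

lemma countP_cons_run (k v : Int) (c : Nat) (r : List Int) (hvr : v ∉ r) :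
    ((v :: List.replicate c v) ++ r).countP
        (fun x => decide ((((v :: List.replicate c v) ++ r).count x : Int) < k))
    = (if 1 + (c : Int) < k then 1 + c else 0)
      + r.countP (fun x => decide ((r.count x : Int) < k)) := by
  have hcv : ((v :: List.replicate c v) ++ r).count v = 1 + c := by
    simp [List.count_append, List.count_eq_zero.mpr hvr]
    omega
  have hall : ∀ x ∈ v :: List.replicate c v, x = v := by
    intro x hx
    rcases List.mem_cons.mp hx with h | h
    · exact h
    · exact List.eq_of_mem_replicate h
  rw [List.countP_append]
  congr 1
  · by_cases hk : 1 + (c : Int) < k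
    · rw [if_pos hk, List.countP_eq_length.mpr]
      · simp
        omega
      · intro x hx
        rw [hall x hx]
        simp only [hcv, decide_eq_true_eq]
        push_cast
        exact hk
    · rw [if_neg hk, List.countP_eq_zero.mpr]
      intro x hx
      rw [hall x hx]
      simp only [hcv, decide_eq_true_eq]
      push_cast
      exact hk
  · apply List.countP_congr
    intro x hx
    have hxv : x ≠ v := fun h => hvr (h ▸ hx)
    have hcnt : (v :: (List.replicate c v ++ r)).count x = r.count x := by
      simp [List.count_append, List.count_replicate, Ne.symm hxv]
    simp [hcnt]

lemma runScanB_eq (k : Int) : ∀ (M : List Int), M.Pairwise (· ≤ ·) → ∀ acc : Int,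
    runScanB k acc M = acc + ((M.countP (fun x => decide ((M.count x : Int) < k)) : Nat) : Int) := by
  suffices H : ∀ (n : Nat) (M : List Int), M.length = n → M.Pairwise (· ≤ ·) → ∀ acc : Int,
      runScanB k acc M = acc + ((M.countP (fun x => decide ((M.count x : Int) < k)) : Nat) : Int) by
    intro M hp acc
    exact H M.length M rfl hp acc
  intro n
  induction n using Nat.strong_induction_on with
  | _ n ih =>
    intro M hn hp acc
    rcases M with _ | ⟨v, t⟩
    · simp [runScanB]
    · obtain ⟨hct, hdr⟩ := takeWhile_count v t hp
      have hrep := takeWhile_replicate v t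
      have h1 : t = t.takeWhile (fun x => x == v) ++ t.dropWhile (fun x => x == v) :=
        (List.takeWhile_append_dropWhile (p := fun x => x == v) (l := t)).symm
      have hrp : (t.dropWhile (fun x => x == v)).Pairwise (· ≤ ·) :=
        ((List.pairwise_cons.mp hp).2).sublist (List.dropWhile_sublist _)
      simp only [runScanB]
      generalize hc : (t.takeWhile (fun x => x == v)).length = c at hct hrep ⊢
      generalize hrr : t.dropWhile (fun x => x == v) = r at hdr hrp h1 ⊢
      have hvr : v ∉ r := List.count_eq_zero.mp hdr
      have hW : v :: t = (v :: List.replicate c v) ++ r := by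
        rw [List.cons_append, h1, hrep]
      have hlen : r.length < n := by
        have h2 := congrArg List.length h1
        have hn' : t.length + 1 = n := by simpa using hn
        simp [hrep] at h2
        omega
      rw [hW, countP_cons_run k v c r hvr, ih r.length hlen r rfl hrp]
      by_cases hk : 1 + (c : Int) < k
      · rw [if_pos hk, if_pos hk]
        push_cast
        ring
      · rw [if_neg hk, if_neg hk]
        push_cast
        ring

lemma solution_eq_alt (k : Int) (score : List Int) : solution k score = solution_alt k score := by
  simp only [solution, solution_alt]
  set L := (score.zip (score.drop 1)).map (fun p => p.1 - p.2) with hL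
  rw [PySem.List.foldl_prod_mk
        (f := fun (l : List Int) (i : Int) =>
          l ++ [PySem.List.pyGetD score i 0 - PySem.List.pyGetD score (i + 1) 0])
        (g := fun (d : PySem.Dict Int Int) (i : Int) =>
          let diff := PySem.List.pyGetD score i 0 - PySem.List.pyGetD score (i + 1) 0
          if (d.get? diff).getD 0 ≠ 0 then d.modify diff 0 (· + 1) else d.insert diff 1)]
  rw [PySem.List.foldl_append_singleton_eq_map, List.nil_append, diffs_eq, ← hL]
  rw [dictA_eq, ← hL]
  rw [PySem.List.foldl_append_ite_eq_filter
        (p := fun x => ((PySem.Dict.counter L).get? x).getD 0 < k), List.nil_append]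
  simp only [← PySem.Dict.getD_eq_get?_getD, PySem.Dict.getD_counter]
  -- A's count: length of the filter = countP over L
  set M := PySem.List.sorted L (fun x => x) false with hM
  have hperm : M.Perm L := PySem.List.sorted_perm L (fun x => x) false
  have hpair : M.Pairwise (· ≤ ·) := by
    have := PySem.List.sorted_pairwise (xs := L) (key := fun (x : Int) => x)
    simpa [hM] using this
  have hcnt : ∀ x, M.count x = L.count x := fun x => hperm.count_eq x
  have hkey : (L.filter (fun x => decide ((L.count x : Int) < k))).length
      = M.countP (fun x => decide ((M.count x : Int) < k)) := by
    rw [← List.countP_eq_length_filter]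
    have h1 : M.countP (fun x => decide ((M.count x : Int) < k))
        = M.countP (fun x => decide ((L.count x : Int) < k)) := by
      apply List.countP_congr
      intro x _
      simp [hcnt x]
    rw [h1, hperm.countP_eq]
  rw [runScanB_eq k M hpair 0]
  rw [← hkey]
  simp

-- ===== VERDICT =====
theorem solution_spec : Claim_equal_solution := by
  intro k score _
  exact solution_eq_alt k score
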